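-- pv_equiv track=rewrite | github.com/ZJU-DAILY/UniView | code/backend/core/parseFilterSpecialCase_SP.py | parseBracketConsistency
-- ===== SOURCE A (Python) =====
-- def parseBracketConsistency(filterStr):
--     cnt = 0
--     i = 0
--     while i < len(filterStr):
--         ch = filterStr[i]
--         if ch == "(":
--             cnt += 1
--         elif ch == ")":
--             cnt -= 1
--         if cnt < 0:
--             break
--
--         i += 1
--     return filterStr[:i]
-- ===== SOURCE B (Python) =====
-- def parseBracketConsistency(filterStr):
--     deltas = [1 if ch == "(" else -1 if ch == ")" else 0 for ch in filterStr]
--     acc = []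
--     total = 0
--     for d in deltas:
--         total += d
--         acc.append(total)
--     j = next((k for k, b in enumerate(acc) if b < 0), len(filterStr))
--     return filterStr[:j]
-- ===== Notes on version B (the rewrite author's own statement) =====
-- stated objective: alternative
-- what changed: Replaces the inline while-loop counter with break by a table-then-search decomposition: map each char to a delta, build the prefix-balance table, and slice at the first index whose balance is negative.
import Mathlib
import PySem

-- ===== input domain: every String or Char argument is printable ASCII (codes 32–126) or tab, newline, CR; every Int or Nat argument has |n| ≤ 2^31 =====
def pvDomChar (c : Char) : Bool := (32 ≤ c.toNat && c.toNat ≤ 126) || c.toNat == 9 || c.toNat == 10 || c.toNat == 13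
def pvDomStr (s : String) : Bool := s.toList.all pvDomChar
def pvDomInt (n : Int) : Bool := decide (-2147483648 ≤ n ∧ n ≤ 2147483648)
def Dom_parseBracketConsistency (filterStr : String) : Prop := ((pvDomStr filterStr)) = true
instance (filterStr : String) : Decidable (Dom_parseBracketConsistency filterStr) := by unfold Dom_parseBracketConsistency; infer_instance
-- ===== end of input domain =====

-- B replaces A's inline counter-with-break loop by a delta-map + prefix-balance table
-- searched for the first negative entry (alternative decomposition, same cost).


-- ===== PORT A =====
-- A's while loop: advance i, updating cnt per char, stop when cnt < 0; return filterStr[:i].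
def pvGoA : List Char → Int → Nat
  | [], _ => 0
  | c :: rest, cnt =>
    let cnt' := if c = '(' then cnt + 1 else if c = ')' then cnt - 1 else cnt
    if cnt' < 0 then 0 else 1 + pvGoA rest cnt'

def parseBracketConsistency (filterStr : String) : String :=
  String.ofList (filterStr.toList.take (pvGoA filterStr.toList 0))

-- ===== PORT B =====
def pvDelta (c : Char) : Int := if c = '(' then 1 else if c = ')' then -1 else 0

-- running prefix sums of the delta list (the `acc` table of Source B)
def pvAccum : List Int → Int → List Int
  | [], _ => []
  | d :: ds, total => (total + d) :: pvAccum ds (total + d)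

def parseBracketConsistency_alt (filterStr : String) : String :=
  let cs := filterStr.toList
  let deltas := cs.map pvDelta
  let acc := pvAccum deltas 0
  let j := match acc.findIdx? (fun b => b < 0) with
           | some k => k
           | none => cs.length
  String.ofList (cs.take j)

-- ===== PRECONDITION & SPEC =====
def Spec_parseBracketConsistency (filterStr : String) (out : String) : Prop := out = parseBracketConsistency_alt filterStr
instance (filterStr : String) (out : String) : Decidable (Spec_parseBracketConsistency filterStr out) := by unfold Spec_parseBracketConsistency; infer_instance

-- ===== CLAIM (what is proved, stated in full; the proofs are below) =====
def Claim_equal_parseBracketConsistency : Prop := ∀ (filterStr : String), Dom_parseBracketConsistency filterStr → Spec_parseBracketConsistency filterStr (parseBracketConsistency filterStr)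

-- ===== LEMMAS AND PROOFS =====

theorem pvGoA_eq_findIdx (cs : List Char) (t : Int) :
    pvGoA cs t = (match (pvAccum (cs.map pvDelta) t).findIdx? (fun b => b < 0) with
                  | some k => k
                  | none => cs.length) := by
  induction cs generalizing t with
  | nil => simp [pvGoA, pvAccum]
  | cons c rest ih =>
    have hd : (if c = '(' then t + 1 else if c = ')' then t - 1 else t) = t + pvDelta c := by
      unfold pvDelta; split_ifs <;> omega
    simp only [List.map_cons, pvAccum, pvGoA, hd, List.findIdx?_cons]
    by_cases hneg : t + pvDelta c < 0
    · simp [hneg]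
    · rw [if_neg hneg]
      simp only [hneg, decide_false]
      rw [ih (t + pvDelta c)]
      cases h : (pvAccum (rest.map pvDelta) (t + pvDelta c)).findIdx? (fun b => b < 0) with
      | none => simp [List.length_cons, Nat.add_comm]
      | some k => simp [Option.map_some, Nat.add_comm]

theorem parseBracketConsistency_spec : Claim_equal_parseBracketConsistency := by
  intro s _
  unfold Spec_parseBracketConsistency parseBracketConsistency parseBracketConsistency_alt
  rw [pvGoA_eq_findIdx]

-- ===== VERDICT (by name: the statement is the Claim_ definition above) =====
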